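-- pv_equiv track=rewrite | github.com/MarcusKarlssonGH/aoc-2021 | day2.py | get_depth_with_aim
-- ===== SOURCE A (Python) =====
-- def get_depth_with_aim(commands):
--     depth, horizontal_pos, aim = 0, 0, 0
--     for command, value in commands:
--         if command == "forward":
--             horizontal_pos += value
--             depth += aim * value
--         if command == "up":
--             aim -= value
--         if command == "down":
--             aim += value
--     return depth * horizontal_pos
-- ===== SOURCE B (Python) =====
-- def get_depth_with_aim(commands):
--     cmds = list(commands)
--     deltas = [v if c == "down" else -v if c == "up" else 0 for c, v in cmds]
--     aims = []
--     t = 0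
--     for d in deltas:
--         t += d
--         aims.append(t)
--     horizontal = sum(v for c, v in cmds if c == "forward")
--     depth = sum(a * v for a, (c, v) in zip(aims, cmds) if c == "forward")
--     return depth * horizontal
-- ===== Notes on version B (the rewrite author's own statement) =====
-- stated objective: alternative
-- what changed: Replaces the single mutable three-accumulator pass with a prefix table of aims (inclusive prefix sums of per-command aim deltas, valid because 'forward' has delta 0) followed by two independent reduction passes for horizontal and depth.
import Mathlib
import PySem

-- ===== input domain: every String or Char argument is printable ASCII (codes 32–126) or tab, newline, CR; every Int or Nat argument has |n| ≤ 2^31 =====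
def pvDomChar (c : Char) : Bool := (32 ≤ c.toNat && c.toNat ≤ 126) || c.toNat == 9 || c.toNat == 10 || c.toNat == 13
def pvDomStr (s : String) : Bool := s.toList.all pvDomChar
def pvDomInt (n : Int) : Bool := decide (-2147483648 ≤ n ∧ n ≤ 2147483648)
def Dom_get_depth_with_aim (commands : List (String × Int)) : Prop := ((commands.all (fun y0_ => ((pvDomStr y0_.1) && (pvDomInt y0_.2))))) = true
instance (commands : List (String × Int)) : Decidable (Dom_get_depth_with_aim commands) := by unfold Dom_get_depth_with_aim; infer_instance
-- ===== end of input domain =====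

-- B replaces A's single mutable (depth, horizontal, aim) pass by a prefix table of aims
-- plus two independent reduction passes; same O(n) cost, different decomposition.

-- ===== PORT A =====
-- A's loop body over (depth, horizontal_pos, aim), branches in source order.
def pvStepA (st : Int × Int × Int) (cv : String × Int) : Int × Int × Int :=
  let (depth, horizontal_pos, aim) := st
  let (command, value) := cv
  let (depth, horizontal_pos) :=
    if command == "forward" then (depth + aim * value, horizontal_pos + value)
    else (depth, horizontal_pos)
  let aim := if command == "up" then aim - value else aim
  let aim := if command == "down" then aim + value else aim
  (depth, horizontal_pos, aim)

def get_depth_with_aim (commands : List (String × Int)) : Int :=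
  let s := commands.foldl pvStepA (0, 0, 0)
  s.1 * s.2.1

-- ===== PORT B =====
-- the Python loop 'for d in deltas: t += d; aims.append(t)' as structural recursion
def pvAims : Int → List Int → List Int
  | _, [] => []
  | t, d :: tl => (t + d) :: pvAims (t + d) tl

def get_depth_with_aim_alt (commands : List (String × Int)) : Int :=
  let deltas := commands.map (fun p =>
    if p.1 == "down" then p.2 else if p.1 == "up" then -p.2 else 0)
  let aims := pvAims 0 deltas
  let horizontal := ((commands.filter (fun p => p.1 == "forward")).map (fun p => p.2)).sum
  let depth := (((aims.zip commands).filter (fun q => q.2.1 == "forward")).map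
    (fun q => q.1 * q.2.2)).sum
  depth * horizontal

-- ===== PRECONDITION & SPEC =====
def Spec_get_depth_with_aim (commands : List (String × Int)) (out : Int) : Prop := out = get_depth_with_aim_alt commands
instance (commands : List (String × Int)) (out : Int) : Decidable (Spec_get_depth_with_aim commands out) := by unfold Spec_get_depth_with_aim; infer_instance

-- ===== CLAIM (what is proved, stated in full; the proofs are below) =====
def Claim_equal_get_depth_with_aim : Prop := ∀ (commands : List (String × Int)), Dom_get_depth_with_aim commands → Spec_get_depth_with_aim commands (get_depth_with_aim commands)

-- ===== LEMMAS AND PROOFS =====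

-- reference characterisation of depth: current aim a before each command
def pvD (a : Int) : List (String × Int) → Int
  | [] => 0
  | (c, v) :: tl =>
    let a' := a + (if c == "down" then v else if c == "up" then -v else 0)
    (if c == "forward" then a * v else 0) + pvD a' tl

def pvH : List (String × Int) → Int
  | [] => 0
  | (c, v) :: tl => (if c == "forward" then v else 0) + pvH tl

def pvS : List (String × Int) → Int
  | [] => 0
  | (c, v) :: tl => (if c == "down" then v else if c == "up" then -v else 0) + pvS tl

theorem foldA_char (cs : List (String × Int)) (d h a : Int) :
    cs.foldl pvStepA (d, h, a) = (d + pvD a cs, h + pvH cs, a + pvS cs) := by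
  induction cs generalizing d h a with
  | nil => simp [pvD, pvH, pvS]
  | cons p tl ih =>
    obtain ⟨c, v⟩ := p
    simp only [List.foldl_cons, pvD, pvH, pvS, pvStepA]
    by_cases hf : c = "forward"
    · subst hf; simp only [beq_self_eq_true, if_true, if_neg (by decide : ¬ (("forward":String) == "up") = true),
        if_neg (by decide : ¬ (("forward":String) == "down") = true), ih]
      simp only [Prod.mk.injEq]; refine ⟨by ring, by ring, by ring⟩
    · by_cases hu : c = "up"
      · subst hu; simp only [if_neg (by decide : ¬ (("up":String) == "forward") = true), beq_self_eq_true, if_true,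
          if_neg (by decide : ¬ (("up":String) == "down") = true), ih]
        simp only [Prod.mk.injEq]; refine ⟨by ring, by ring, by ring⟩
      · by_cases hd : c = "down"
        · subst hd; simp only [if_neg (by decide : ¬ (("down":String) == "forward") = true),
            if_neg (by decide : ¬ (("down":String) == "up") = true), beq_self_eq_true, if_true, ih]
          simp only [Prod.mk.injEq]; refine ⟨by ring, by ring, by ring⟩
        · have hf' : (c == "forward") = false := by simpa using hf
          have hu' : (c == "up") = false := by simpa using hu
          have hd' : (c == "down") = false := by simpa using hd
          simp only [hf', hu', hd', if_false, ih]
          simp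

theorem depthB_char (cs : List (String × Int)) (t : Int) :
    ((((pvAims t (cs.map (fun p =>
        if p.1 == "down" then p.2 else if p.1 == "up" then -p.2 else 0))).zip cs).filter
        (fun q => q.2.1 == "forward")).map (fun q => q.1 * q.2.2)).sum = pvD t cs := by
  induction cs generalizing t with
  | nil => simp [pvAims, pvD]
  | cons p tl ih =>
    obtain ⟨c, v⟩ := p
    simp only [List.map_cons, pvAims, List.zip_cons_cons, List.filter_cons, pvD]
    by_cases hf : c = "forward"
    · subst hf
      simp only [beq_self_eq_true, if_true,
        if_neg (by decide : ¬ (("forward":String) == "down") = true),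
        if_neg (by decide : ¬ (("forward":String) == "up") = true),
        List.map_cons, List.sum_cons, add_zero, ih]
    · by_cases hu : c = "up"
      · subst hu
        simp only [if_neg (by decide : ¬ (("up":String) == "forward") = true),
          if_neg (by decide : ¬ (("up":String) == "down") = true), beq_self_eq_true, if_true,
          if_false, cond_false, zero_add, ih]
      · by_cases hd : c = "down"
        · subst hd
          simp only [beq_self_eq_true, if_true,
            if_neg (by decide : ¬ (("down":String) == "forward") = true), if_false, zero_add, ih]
        · have hf' : (c == "forward") = false := by simpa using hf
          have hu' : (c == "up") = false := by simpa using hu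
          have hd' : (c == "down") = false := by simpa using hd
          simp only [hf', hu', hd', Bool.false_eq_true, if_false, add_zero, zero_add]
          exact ih t

theorem horB_char (cs : List (String × Int)) :
    ((cs.filter (fun p => p.1 == "forward")).map (fun p => p.2)).sum = pvH cs := by
  induction cs with
  | nil => simp [pvH]
  | cons p tl ih =>
    obtain ⟨c, v⟩ := p
    simp only [List.filter_cons, pvH]
    by_cases hf : c = "forward" <;> simp [hf, ih]

-- ===== VERDICT (by name: the statement is the Claim_ definition above) =====
theorem get_depth_with_aim_spec : Claim_equal_get_depth_with_aim := by
  intro cs _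
  unfold Spec_get_depth_with_aim get_depth_with_aim get_depth_with_aim_alt
  simp only [foldA_char, depthB_char, horB_char]
  simp
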